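-- pv_equiv track=rewrite | github.com/sykwon/sigmod2025like | src/util.py | augment_query_placeholder
-- ===== SOURCE A (Python) =====
-- def augment_query_placeholder(query, unique=True, trim=False):
--     aug_queries = []
--     if trim:
--         assert query[0] == "%" and query[-1] != "%"
--         query += "%"
--     assert query[0] == "%" and query[-1] == "%"
--     query_len = len(query)
--     placeholder_list = ["%" if ch == "%" else "_" for ch in query]
--     for i in range(query_len):
--         placeholder_list[i] = query[i]
--         aug_query = "".join(placeholder_list)
--         aug_query = normalize_like_query(aug_query, trim)
--         if unique:
--             if len(aug_queries) == 0 or aug_queries[-1] != aug_query: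
--                 aug_queries.append(aug_query)
--         else:
--             aug_queries.append(aug_query)
--     if trim:
--         aug_queries = aug_queries[:-1]
--
--     return aug_queries
--
-- def normalize_like_query(query, trim=False):
--     #         '_'
--     #         / \
--     #   '%'   v |
--     # 0 --->   1   ---> 2
--     #         ^ |
--     #         \ /
--     #         '%'
--     assert query[-1] == "%"
--     char_list = list(query)
--     state = 0
--     for i in reversed(range(len(query))):
--         ch = query[i]
--         if state == 0:
--             if ch == "%":
--                 state = 1
--             else:
--                 break
--         elif state == 1:
--             if ch == "%":
--                 char_list.pop(i)
--             elif ch == "_":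
--                 state = 1
--             else:
--                 state = 2
--                 break
--
--     return "".join(char_list)
-- ===== SOURCE B (Python) =====
-- def augment_query_placeholder(query, unique=True, trim=False):
--     if trim:
--         assert query[0] == "%" and query[-1] != "%"
--         query += "%"
--     assert query[0] == "%" and query[-1] == "%"
--     mask = "".join("%" if c == "%" else "_" for c in query)
--     out = []
--     for i in range(len(query)):
--         s = query[:i + 1] + mask[i + 1:]
--         # closed-form normalization: replace the maximal trailing run of
--         # '%'/'_' chars by its underscores followed by a single '%'
--         j = len(s)
--         while j > 0 and s[j - 1] in "%_":
--             j -= 1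
--         v = s[:j] + s[j:].replace("%", "") + "%"
--         if not (unique and out and out[-1] == v):
--             out.append(v)
--     return out[:-1] if trim else out
-- ===== Notes on version B (the rewrite author's own statement) =====
-- stated objective: simpler
-- what changed: Replaces the reverse-scan pop state machine of normalize_like_query by its closed form (rewrite the maximal trailing '%'/'_' run to its underscores plus one '%') and builds each variant directly as query[:i+1]+mask[i+1:] instead of mutating a shared placeholder list in place.
import Mathlib
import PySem

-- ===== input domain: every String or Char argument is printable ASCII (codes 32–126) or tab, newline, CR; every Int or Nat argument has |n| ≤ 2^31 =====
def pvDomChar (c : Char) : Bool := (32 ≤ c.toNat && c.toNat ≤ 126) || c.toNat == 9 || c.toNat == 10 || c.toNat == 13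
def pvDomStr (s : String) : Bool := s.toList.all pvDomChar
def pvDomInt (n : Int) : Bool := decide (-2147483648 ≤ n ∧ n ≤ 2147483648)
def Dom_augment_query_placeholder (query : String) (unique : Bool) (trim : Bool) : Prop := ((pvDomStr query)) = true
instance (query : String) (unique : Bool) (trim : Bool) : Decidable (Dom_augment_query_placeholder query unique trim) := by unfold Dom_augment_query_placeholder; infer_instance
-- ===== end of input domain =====

-- B replaces A's reverse-scan pop state machine by a closed-form rewrite of the
-- maximal trailing '%'/'_' run and builds each variant directly from the prefix
-- and the masked suffix instead of mutating a shared placeholder list (objective: simpler).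

-- ===== PORT A =====
-- placeholder_list comprehension: '%' stays '%', every other char becomes '_'
def pvMask (c : Char) : Char := if c = '%' then '%' else '_'

-- normalize_like_query's loop over reversed(range(len(query))), written as
-- recursion over the reversed char list: normRev is state 0, normLoop is state 1
-- ('%' in state 1 = char_list.pop(i); break = keep the rest untouched).
def normLoop : List Char → List Char
  | [] => []
  | c :: rest =>
      if c = '%' then normLoop rest
      else if c = '_' then c :: normLoop rest
      else c :: rest

def normRev : List Char → List Char
  | [] => []
  | c :: rest => if c = '%' then c :: normLoop rest else c :: rest

def normalizeA (s : String) : String := String.ofList ((normRev s.toList.reverse).reverse)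

-- one iteration of A's for-loop: reveal query[i], join, normalize, conditional append
def stepA (q : List Char) (unique : Bool) (st : List Char × List String) (i : Nat) :
    List Char × List String :=
  let pl := st.1.set i (q.getD i ' ')
  let s := normalizeA (String.ofList pl)
  let acc := st.2
  (pl, if unique then (if acc.isEmpty || acc.getLast? != some s then acc ++ [s] else acc)
       else acc ++ [s])

def augment_query_placeholder (query : String) (unique : Bool) (trim : Bool) : List String :=
  let q := if trim then query.toList ++ ['%'] else query.toList
  let pl0 := q.map pvMask
  let res := (List.range q.length).foldl (stepA q unique) (pl0, [])
  if trim then res.2.dropLast else res.2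

-- ===== PORT B =====
-- Source B's while loop 'while j>0 and s[j-1] in "%_": j -= 1' splits off the maximal
-- trailing run of '%'/'_'; then s[:j] + s[j:].replace("%","") + "%".
def normB (s : List Char) : List Char :=
  let rev := s.reverse
  let run := rev.takeWhile (fun c => c = '%' || c = '_')
  let pre := rev.dropWhile (fun c => c = '%' || c = '_')
  pre.reverse ++ run.reverse.filter (fun c => !(c = '%')) ++ ['%']

-- one iteration of Source B's loop: build the variant directly, then conditional append
def stepB (q mask : List Char) (unique : Bool) (acc : List String) (i : Nat) : List String :=
  let v := String.ofList (normB (q.take (i+1) ++ mask.drop (i+1)))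
  if unique && !acc.isEmpty && acc.getLast? == some v then acc else acc ++ [v]

def augment_query_placeholder_alt (query : String) (unique : Bool) (trim : Bool) : List String :=
  let q := if trim then query.toList ++ ['%'] else query.toList
  let mask := q.map pvMask
  let out := (List.range q.length).foldl (stepB q mask unique) []
  if trim then out.dropLast else out

-- ===== PRECONDITION & SPEC =====
-- Pre_ excludes exactly the inputs on which A's asserts (or query[0] on "") raise:
-- the query must start with '%' and end with '%' (trim=False) resp. not end with '%' (trim=True).
def Pre_augment_query_placeholder (query : String) (unique : Bool) (trim : Bool) : Prop :=
  query.toList.head? = some '%' ∧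
  (if trim then query.toList.getLast? ≠ some '%' else query.toList.getLast? = some '%')
instance (query : String) (unique : Bool) (trim : Bool) :
    Decidable (Pre_augment_query_placeholder query unique trim) := by
  unfold Pre_augment_query_placeholder; infer_instance

def pvWitness_augment_query_placeholder : String × Bool × Bool := ("%ab%", true, false)

def Spec_augment_query_placeholder (query : String) (unique : Bool) (trim : Bool) (out : List String) : Prop := out = augment_query_placeholder_alt query unique trim
instance (query : String) (unique : Bool) (trim : Bool) (out : List String) : Decidable (Spec_augment_query_placeholder query unique trim out) := by unfold Spec_augment_query_placeholder; infer_instance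

-- ===== CLAIM (what is proved, stated in full; the proofs are below) =====
def Claim_equal_augment_query_placeholder : Prop := ∀ (query : String) (unique : Bool) (trim : Bool), Dom_augment_query_placeholder query unique trim → Pre_augment_query_placeholder query unique trim → Spec_augment_query_placeholder query unique trim (augment_query_placeholder query unique trim)

-- ===== LEMMAS AND PROOFS =====

lemma normLoop_eq (r : List Char) :
    normLoop r = (r.takeWhile (fun c => c = '%' || c = '_')).filter (fun c => !(c = '%'))
      ++ r.dropWhile (fun c => c = '%' || c = '_') := by
  induction r with
  | nil => rfl
  | cons c t ih =>
    by_cases h1 : c = '%'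
    · simp [normLoop, h1, ih]
    · by_cases h2 : c = '_'
      · simp [normLoop, h1, h2, ih]
      · simp [normLoop, h1, h2]

lemma normB_eq (l : List Char) (hl : l.getLast? = some '%') :
    (normRev l.reverse).reverse = normB l := by
  have hh : l.reverse.head? = some '%' := by simpa using hl
  obtain ⟨r, hr⟩ : ∃ r, l.reverse = '%' :: r := by
    cases hrev : l.reverse with
    | nil => rw [hrev] at hh; simp at hh
    | cons a t =>
      rw [hrev] at hh
      simp at hh
      exact ⟨t, by rw [hh]⟩
  unfold normB
  rw [hr]
  simp only [normRev, if_pos rfl, ]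
  simp [normLoop_eq, List.filter_append, List.filter_reverse]

lemma set_take_drop (q mask : List Char) (d : Char) (n : Nat) (hn : n < q.length)
    (hm : mask.length = q.length) :
    (q.take n ++ mask.drop n).set n (q.getD n d) = q.take (n+1) ++ mask.drop (n+1) := by
  have hmn : n < mask.length := by omega
  have hdrop : mask.drop n = mask[n] :: mask.drop (n+1) := List.drop_eq_getElem_cons hmn
  have htake : q.take (n+1) = q.take n ++ [q[n]] := by
    rw [List.take_add_one]; simp [List.getElem?_eq_getElem hn]
  have hlen : (q.take n).length = n := List.length_take_of_le (by omega)
  have hgd : q.getD n d = q[n] := by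
    simp [List.getD_eq_getElem?_getD, List.getElem?_eq_getElem hn]
  rw [List.set_append, hlen, if_neg (lt_irrefl n), Nat.sub_self, hdrop, hgd,
    List.set_cons_zero, htake, List.append_assoc]
  rfl

lemma getLast_pl (q : List Char) (hq : q.getLast? = some '%') (n : Nat) :
    (q.take (n+1) ++ (q.map pvMask).drop (n+1)).getLast? = some '%' := by
  rcases Nat.lt_or_ge (n+1) q.length with h | h
  · rw [List.getLast?_append, List.getLast?_drop, if_neg (by simp; omega),
      List.getLast?_map, hq]
    simp [pvMask]
  · have hq' : q.take (n+1) = q := List.take_of_length_le h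
    have hd : (q.map pvMask).drop (n+1) = [] := by
      simp [List.drop_eq_nil_iff]; omega
    simp [hq', hd, hq]

lemma step_acc (unique : Bool) (acc : List String) (s : String) :
    (if unique then (if acc.isEmpty || acc.getLast? != some s then acc ++ [s] else acc)
      else acc ++ [s])
    = (if unique && !acc.isEmpty && acc.getLast? == some s then acc else acc ++ [s]) := by
  cases unique
  · simp
  · cases h : acc.isEmpty
    · by_cases hl : acc.getLast? = some s <;> simp [hl]
    · simp

lemma fold_inv (q : List Char) (hq : q.getLast? = some '%') (unique : Bool) :
    ∀ n, n ≤ q.length →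
    (List.range n).foldl (stepA q unique) (q.map pvMask, []) =
      (q.take n ++ (q.map pvMask).drop n,
        (List.range n).foldl (stepB q (q.map pvMask) unique) []) := by
  intro n
  induction n with
  | zero => intro _; simp
  | succ n ih =>
    intro hn
    have hn' : n < q.length := by omega
    rw [List.range_succ, List.foldl_append, List.foldl_append, ih (by omega)]
    simp only [List.foldl_cons, List.foldl_nil]
    unfold stepA
    simp only
    have hset : (q.take n ++ (q.map pvMask).drop n).set n (q.getD n ' ')
        = q.take (n+1) ++ (q.map pvMask).drop (n+1) :=
      set_take_drop q (q.map pvMask) ' ' n hn' (by simp)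
    rw [hset]
    have hnorm : normalizeA (String.ofList (q.take (n+1) ++ (q.map pvMask).drop (n+1)))
        = String.ofList (normB (q.take (n+1) ++ (q.map pvMask).drop (n+1))) := by
      unfold normalizeA
      rw [String.toList_ofList, normB_eq _ (getLast_pl q hq n)]
    rw [hnorm]
    unfold stepB
    simp only
    rw [step_acc]

-- ===== VERDICT (by name: the statement is the Claim_ definition above) =====
theorem augment_query_placeholder_spec : Claim_equal_augment_query_placeholder := by
  intro query unique trim _ hpre
  unfold Spec_augment_query_placeholder augment_query_placeholder augment_query_placeholder_alt
  have hq : (if trim then query.toList ++ ['%'] else query.toList).getLast? = some '%' := by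
    cases trim
    · simpa using hpre.2
    · simp
  simp only []
  rw [fold_inv _ hq unique _ le_rfl]
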